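-- pv_equiv track=rewrite | github.com/ZahraReyhanian/XIDiff | recognition/external_mapping.py | get_dim
-- ===== SOURCE A (Python) =====
-- def get_dim(style_dims=[]):
--     cdim = 0
--     for index in style_dims:
--         if index == 2:
--             cdim += 64
--         if index == 4:
--             cdim += 128
--         if index == 6:
--             cdim += 256
--         if index == 8:
--             cdim += 512
--     return cdim
-- ===== SOURCE B (Python) =====
-- def get_dim(style_dims=[]):
--     return (style_dims.count(2) * 64
--             + style_dims.count(4) * 128
--             + style_dims.count(6) * 256
--             + style_dims.count(8) * 512)
-- ===== Notes on version B (the rewrite author's own statement) =====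
-- stated objective: simpler
-- what changed: Replaces the single accumulator loop with four inline guards by a closed weighted sum of value counts (count(2)*64 + count(4)*128 + count(6)*256 + count(8)*512).
import Mathlib
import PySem

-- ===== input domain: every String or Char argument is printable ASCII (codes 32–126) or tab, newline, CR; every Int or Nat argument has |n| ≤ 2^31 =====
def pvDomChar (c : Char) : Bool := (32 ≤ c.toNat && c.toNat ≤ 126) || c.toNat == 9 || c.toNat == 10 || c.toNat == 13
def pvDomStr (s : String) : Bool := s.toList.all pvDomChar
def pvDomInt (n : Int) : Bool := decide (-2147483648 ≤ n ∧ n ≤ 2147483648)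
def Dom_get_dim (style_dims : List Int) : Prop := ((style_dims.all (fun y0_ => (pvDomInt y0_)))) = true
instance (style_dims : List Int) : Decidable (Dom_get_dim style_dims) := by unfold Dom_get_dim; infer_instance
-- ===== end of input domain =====

-- B replaces A's single accumulator loop (four inline guards) by a weighted sum of occurrence counts; objective: simpler.


-- ===== PORT A =====
def get_dim (style_dims : List Int) : Int :=
  style_dims.foldl (fun cdim index =>
    let cdim := if index = 2 then cdim + 64 else cdim
    let cdim := if index = 4 then cdim + 128 else cdim
    let cdim := if index = 6 then cdim + 256 else cdim
    if index = 8 then cdim + 512 else cdim) 0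

-- ===== PORT B =====
def get_dim_alt (style_dims : List Int) : Int :=
  (PySem.List.count style_dims 2) * 64
    + (PySem.List.count style_dims 4) * 128
    + (PySem.List.count style_dims 6) * 256
    + (PySem.List.count style_dims 8) * 512

-- ===== PRECONDITION & SPEC =====
def Spec_get_dim (style_dims : List Int) (out : Int) : Prop := out = get_dim_alt style_dims
instance (style_dims : List Int) (out : Int) : Decidable (Spec_get_dim style_dims out) := by unfold Spec_get_dim; infer_instance

-- ===== CLAIM (what is proved, stated in full; the proofs are below) =====
def Claim_equal_get_dim : Prop := ∀ (style_dims : List Int), Dom_get_dim style_dims → Spec_get_dim style_dims (get_dim style_dims)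

-- ===== LEMMAS AND PROOFS =====
theorem get_dim_foldl_acc (xs : List Int) (c : Int) :
    xs.foldl (fun cdim index =>
      let cdim := if index = 2 then cdim + 64 else cdim
      let cdim := if index = 4 then cdim + 128 else cdim
      let cdim := if index = 6 then cdim + 256 else cdim
      if index = 8 then cdim + 512 else cdim) c = c + get_dim_alt xs := by
  induction xs generalizing c with
  | nil => simp [get_dim_alt, PySem.List.count]
  | cons x xs ih =>
    simp only [List.foldl_cons, ih]
    simp only [get_dim_alt, PySem.List.count, List.count_cons]
    by_cases h2 : x = 2 <;> by_cases h4 : x = 4 <;> by_cases h6 : x = 6 <;> by_cases h8 : x = 8 <;>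
      simp [h2, h4, h6, h8] <;> ring

-- ===== VERDICT (by name: the statement is the Claim_ definition above) =====
theorem get_dim_spec : Claim_equal_get_dim := by
  intro xs _
  unfold Spec_get_dim get_dim
  simpa using get_dim_foldl_acc xs 0
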